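-- pv_equiv track=rewrite | github.com/SuvorovDV/zashitu | backend/config.py | min_tier_for
-- ===== SOURCE A (Python) =====
-- from typing import Any, Dict
--
-- TIERS: Dict[str, Any] = {
--     "basic": {
--         "price_cents": 100,
--         "price_rub": 99,
--         "slides": 12,
--         "max_slides": 12,
--         "max_duration_minutes": 15,
--         "model": "claude-sonnet-4-6",
--         "label": "Базовый",
--     },
--     "standard": {
--         "price_cents": 200,
--         "price_rub": 199,
--         "slides": 20,
--         "max_slides": 20,
--         "max_duration_minutes": 25,
--         "model": "claude-sonnet-4-6",
--         "label": "Стандарт",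
--     },
--     "premium": {
--         "price_cents": 400,
--         "price_rub": 399,
--         "slides": 30,
--         "max_slides": 30,
--         "max_duration_minutes": 45,
--         "model": "claude-opus-4-7",
--         "label": "Премиум",
--     },
-- }
--
-- TIER_ORDER = ["basic", "standard", "premium"]
--
-- def min_tier_for(slides_count: int | None, duration_minutes: int | None) -> str:
--     """Возвращает id минимального тарифа, который покрывает запрошенный объём."""
--     for tier_id in TIER_ORDER:
--         cfg = TIERS[tier_id]
--         if slides_count and slides_count > cfg["max_slides"]:
--             continue
--         if duration_minutes and duration_minutes > cfg["max_duration_minutes"]: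
--             continue
--         return tier_id
--     return TIER_ORDER[-1]
-- ===== SOURCE B (Python) =====
-- from typing import Any, Dict
--
-- TIERS: Dict[str, Any] = {
--     "basic": {"price_cents": 100, "price_rub": 99, "slides": 12, "max_slides": 12,
--               "max_duration_minutes": 15, "model": "claude-sonnet-4-6", "label": "Базовый"},
--     "standard": {"price_cents": 200, "price_rub": 199, "slides": 20, "max_slides": 20,
--                  "max_duration_minutes": 25, "model": "claude-sonnet-4-6", "label": "Стандарт"},
--     "premium": {"price_cents": 400, "price_rub": 399, "slides": 30, "max_slides": 30,
--                 "max_duration_minutes": 45, "model": "claude-opus-4-7", "label": "Премиум"},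
-- }
--
-- TIER_ORDER = ["basic", "standard", "premium"]
--
--
-- def min_tier_for(slides_count, duration_minutes):
--     """Два независимых индекса (по слайдам и по длительности), берём максимум."""
--     def idx(value, key):
--         if not value:
--             return 0
--         for i, tier_id in enumerate(TIER_ORDER):
--             if value <= TIERS[tier_id][key]:
--                 return i
--         return len(TIER_ORDER) - 1
--     i = idx(slides_count, "max_slides")
--     j = idx(duration_minutes, "max_duration_minutes")
--     return TIER_ORDER[max(i, j)]
-- ===== Notes on version B (the rewrite author's own statement) =====
-- stated objective: alternative
-- what changed: Instead of A's single scan over TIER_ORDER with continue-style constraint checks, B computes two independent tier indices (smallest tier covering the slide count, smallest covering the duration, each clamped to the last tier and 0 for falsy input) and returns the tier at the maximum of the two indices.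
import Mathlib
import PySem

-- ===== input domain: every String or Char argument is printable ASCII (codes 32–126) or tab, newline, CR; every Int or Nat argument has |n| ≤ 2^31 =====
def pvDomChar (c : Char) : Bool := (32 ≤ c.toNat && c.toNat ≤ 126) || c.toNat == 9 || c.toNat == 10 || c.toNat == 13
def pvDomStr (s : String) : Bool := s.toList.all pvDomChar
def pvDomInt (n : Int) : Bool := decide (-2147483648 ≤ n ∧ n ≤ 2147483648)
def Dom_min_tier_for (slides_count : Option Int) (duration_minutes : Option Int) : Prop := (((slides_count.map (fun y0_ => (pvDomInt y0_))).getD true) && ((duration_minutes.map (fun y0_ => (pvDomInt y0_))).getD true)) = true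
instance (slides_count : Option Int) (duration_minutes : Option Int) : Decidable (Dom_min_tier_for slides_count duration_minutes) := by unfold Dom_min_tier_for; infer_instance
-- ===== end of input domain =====

-- B replaces A's single scan with two independently computed tier indices (slides / duration)
-- combined by max; objective: alternative decomposition, same cost.

-- ===== PORT A =====
-- TIERS lookup restricted to the two fields the loop reads
def pvTierOrder : List String := ["basic", "standard", "premium"]

def pvMaxSlides (t : String) : Int :=
  if t = "basic" then 12 else if t = "standard" then 20 else 30

def pvMaxDur (t : String) : Int :=
  if t = "basic" then 15 else if t = "standard" then 25 else 45

-- Python truthiness of `int | None`: None and 0 are falsy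
def pvTruthy : Option Int → Bool
  | none => false
  | some n => n ≠ 0

-- the `for tier_id in TIER_ORDER` loop; [] = loop finished → TIER_ORDER[-1] = "premium"
def pvLoopA (slides_count duration_minutes : Option Int) : List String → String
  | [] => "premium"
  | t :: rest =>
    if pvTruthy slides_count && decide (slides_count.getD 0 > pvMaxSlides t) then
      pvLoopA slides_count duration_minutes rest
    else if pvTruthy duration_minutes && decide (duration_minutes.getD 0 > pvMaxDur t) then
      pvLoopA slides_count duration_minutes rest
    else t

def min_tier_for (slides_count : Option Int) (duration_minutes : Option Int) : String :=
  pvLoopA slides_count duration_minutes pvTierOrder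

-- ===== PORT B =====
-- smallest tier index whose threshold covers `value` (0 when value is falsy),
-- clamped to the last index when nothing covers it
def pvIdx (value : Option Int) (thresholds : List Int) : Nat :=
  match value with
  | none => 0
  | some n =>
    if n = 0 then 0
    else
      let k := thresholds.findIdx (fun t => decide (n ≤ t))
      if k = thresholds.length then thresholds.length - 1 else k

def min_tier_for_alt (slides_count : Option Int) (duration_minutes : Option Int) : String :=
  let i := pvIdx slides_count [12, 20, 30]
  let j := pvIdx duration_minutes [15, 25, 45]
  pvTierOrder.getD (max i j) "premium"

-- ===== PRECONDITION & SPEC =====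
def Spec_min_tier_for (slides_count : Option Int) (duration_minutes : Option Int) (out : String) : Prop := out = min_tier_for_alt slides_count duration_minutes
instance (slides_count : Option Int) (duration_minutes : Option Int) (out : String) : Decidable (Spec_min_tier_for slides_count duration_minutes out) := by unfold Spec_min_tier_for; infer_instance

-- ===== CLAIM (what is proved, stated in full; the proofs are below) =====
def Claim_equal_min_tier_for : Prop := ∀ (slides_count : Option Int) (duration_minutes : Option Int), Dom_min_tier_for slides_count duration_minutes → Spec_min_tier_for slides_count duration_minutes (min_tier_for slides_count duration_minutes)

-- ===== LEMMAS AND PROOFS =====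
set_option maxHeartbeats 2000000 in
theorem min_tier_both (s d : Int) :
    min_tier_for (some s) (some d) = min_tier_for_alt (some s) (some d) := by
  simp only [min_tier_for, min_tier_for_alt, pvLoopA, pvTierOrder, pvIdx,
    pvMaxSlides, pvMaxDur, pvTruthy, List.findIdx, List.findIdx.go, Option.getD,
    String.reduceEq, reduceIte, Bool.false_and, Bool.cond_eq_ite,
    Bool.and_eq_true, decide_eq_true_eq, ne_eq, List.length_cons, List.length_nil]
  split_ifs <;> first | rfl | omega | (simp only [decide_eq_true_eq] at * <;> omega)

theorem min_tier_some_none (s : Int) :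
    min_tier_for (some s) none = min_tier_for_alt (some s) none := by
  simp only [min_tier_for, min_tier_for_alt, pvLoopA, pvTierOrder, pvIdx,
    pvMaxSlides, pvMaxDur, pvTruthy, List.findIdx, List.findIdx.go, Option.getD,
    String.reduceEq, reduceIte, Bool.false_and, Bool.cond_eq_ite,
    Bool.and_eq_true, decide_eq_true_eq, ne_eq, List.length_cons, List.length_nil]
  split_ifs <;> first | rfl | omega | (simp only [decide_eq_true_eq] at * <;> omega)

theorem min_tier_none_some (d : Int) :
    min_tier_for none (some d) = min_tier_for_alt none (some d) := by
  simp only [min_tier_for, min_tier_for_alt, pvLoopA, pvTierOrder, pvIdx,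
    pvMaxSlides, pvMaxDur, pvTruthy, List.findIdx, List.findIdx.go, Option.getD,
    String.reduceEq, reduceIte, Bool.false_and, Bool.cond_eq_ite,
    Bool.and_eq_true, decide_eq_true_eq, ne_eq, List.length_cons, List.length_nil]
  split_ifs <;> first | rfl | omega | (simp only [decide_eq_true_eq] at * <;> omega)

-- ===== VERDICT (by name: the statement is the Claim_ definition above) =====
theorem min_tier_for_spec : Claim_equal_min_tier_for := by
  intro s d _
  unfold Spec_min_tier_for
  match s, d with
  | none, none => decide
  | some s, none => exact min_tier_some_none s
  | none, some d => exact min_tier_none_some d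
  | some s, some d => exact min_tier_both s d
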